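-- pv_equiv track=rewrite | github.com/eshan-singh78/lorem_ipsum_stash | sebiv2/pipeline1.py | remove_repeated_headers
-- ===== SOURCE A (Python) =====
-- def remove_repeated_headers(pages: list[str]) -> list[str]:
--     """
--     Detect lines appearing verbatim on 3 or more consecutive pages and
--     remove them from ALL pages in the document.
--     """
--     if not pages:
--         return pages
--
--     # Split each page into lines
--     split_pages = [page.splitlines() for page in pages]
--     n = len(split_pages)
--
--     # Find lines that appear on 3+ consecutive pages
--     repeated_lines: set[str] = set()
--
--     # For each line in each page, check if it appears on the next 2 pages as well
--     for i in range(n):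
--         for line in split_pages[i]:
--             if not line.strip():
--                 continue
--             if line in repeated_lines:
--                 continue
--             # Count consecutive pages (starting at i) that contain this line
--             consecutive = 0
--             for j in range(i, n):
--                 if line in split_pages[j]:
--                     consecutive += 1
--                 else:
--                     break
--             if consecutive >= 3:
--                 repeated_lines.add(line)
--
--     if not repeated_lines:
--         return pages
--
--     # Remove repeated lines from all pages
--     result = []
--     for page_lines in split_pages:
--         filtered = [line for line in page_lines if line not in repeated_lines]
--         result.append("\n".join(filtered))
--
--     return result
-- ===== SOURCE B (Python) =====
-- def remove_repeated_headers(pages: list[str]) -> list[str]: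
--     """B: one forward sweep maintaining per-line consecutive-run streaks."""
--     if not pages:
--         return pages
--
--     split_pages = [page.splitlines() for page in pages]
--
--     repeated: set[str] = set()
--     streak: dict[str, int] = {}
--     for page_lines in split_pages:
--         new_streak: dict[str, int] = {}
--         for line in page_lines:
--             if not line.strip():
--                 continue
--             v = streak.get(line, 0) + 1
--             new_streak[line] = v
--             if v >= 3:
--                 repeated.add(line)
--         streak = new_streak
--
--     if not repeated:
--         return pages
--
--     return ["\n".join(l for l in lines if l not in repeated)
--             for lines in split_pages]
-- ===== Notes on version B (the rewrite author's own statement) =====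
-- stated objective: alternative
-- what changed: Replaced A's quadratic per-line 'rescan consecutive pages from each starting page' detection by a single forward sweep over pages maintaining a per-line streak dictionary that flags a line once its consecutive-page streak reaches 3; the guards and the filter+join tail are kept.
import Mathlib
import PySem

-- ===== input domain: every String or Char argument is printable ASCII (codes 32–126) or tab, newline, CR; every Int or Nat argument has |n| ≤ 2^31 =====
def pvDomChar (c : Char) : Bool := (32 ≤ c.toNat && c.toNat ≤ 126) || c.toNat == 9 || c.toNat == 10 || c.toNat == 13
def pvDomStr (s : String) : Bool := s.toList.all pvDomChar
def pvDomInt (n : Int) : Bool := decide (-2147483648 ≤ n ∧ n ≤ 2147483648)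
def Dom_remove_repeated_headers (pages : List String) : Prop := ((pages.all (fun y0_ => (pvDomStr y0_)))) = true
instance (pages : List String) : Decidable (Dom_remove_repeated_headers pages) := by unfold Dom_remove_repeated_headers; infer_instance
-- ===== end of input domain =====

-- B replaces A's per-line "count consecutive pages from each starting page" rescan by a single
-- forward sweep over the pages maintaining a per-line streak dictionary (objective: alternative).

-- ===== PORT A =====
-- A's inner 'for j in range(i, n): … else: break' loop, counting the consecutive run from page j
def pvCountRun (split : List (List String)) (line : String) (n j : Nat) : Nat :=
  if j < n then
    if line ∈ split.getD j [] then pvCountRun split line n (j + 1) + 1 else 0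
  else 0
termination_by n - j

def pvRepA (split : List (List String)) : PySem.Set String :=
  (List.range split.length).foldl (fun rep i =>
    (split.getD i []).foldl (fun rep line =>
      if PySem.Str.strip line = "" then rep
      else if rep.contains line then rep
      else if 3 ≤ pvCountRun split line split.length i then PySem.Set.add rep line
      else rep) rep) PySem.Set.empty


def remove_repeated_headers (pages : List String) : List String :=
  if pages = [] then pages
  else
    let split_pages := pages.map (fun page => PySem.Str.splitlines page)
    let repeated_lines := pvRepA split_pages
    if repeated_lines = [] then pages
    else split_pages.map (fun page_lines =>
      PySem.Str.join "\n" (page_lines.filter (fun line => !(repeated_lines.contains line))))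

-- ===== PORT B =====
-- one page of B's sweep: state = (repeated-so-far, previous page's streak dict); builds the
-- page's fresh streak dict and flags lines whose consecutive streak reaches 3
def pvStepB (st : PySem.Set String × PySem.Dict String Int) (page_lines : List String) :
    PySem.Set String × PySem.Dict String Int :=
  let streak := st.2
  page_lines.foldl (fun st2 line =>
    if PySem.Str.strip line = "" then st2
    else
      let v := streak.getD line 0 + 1
      let ns := st2.2.insert line v
      if 3 ≤ v then (PySem.Set.add st2.1 line, ns) else (st2.1, ns))
    (st.1, PySem.Dict.empty)


def remove_repeated_headers_alt (pages : List String) : List String :=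
  if pages = [] then pages
  else
    let split_pages := pages.map (fun page => PySem.Str.splitlines page)
    let repeated := (split_pages.foldl pvStepB (PySem.Set.empty, PySem.Dict.empty)).1
    if repeated = [] then pages
    else split_pages.map (fun page_lines =>
      PySem.Str.join "\n" (page_lines.filter (fun line => !(repeated.contains line))))

-- ===== PRECONDITION & SPEC =====
def Spec_remove_repeated_headers (pages : List String) (out : List String) : Prop := out = remove_repeated_headers_alt pages
instance (pages : List String) (out : List String) : Decidable (Spec_remove_repeated_headers pages out) := by unfold Spec_remove_repeated_headers; infer_instance

-- ===== CLAIM (what is proved, stated in full; the proofs are below) =====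
def Claim_equal_remove_repeated_headers : Prop := ∀ (pages : List String), Dom_remove_repeated_headers pages → Spec_remove_repeated_headers pages (remove_repeated_headers pages)

-- ===== LEMMAS AND PROOFS =====

theorem countRun_succ_le (split : List (List String)) (l : String) (n j k : Nat) :
    k + 1 ≤ pvCountRun split l n j ↔ (j < n ∧ l ∈ split.getD j [] ∧ k ≤ pvCountRun split l n (j+1)) := by
  rw [pvCountRun]
  by_cases h1 : j < n
  · rw [if_pos h1]
    by_cases h2 : l ∈ split.getD j []
    · rw [if_pos h2]
      constructor
      · intro h; exact ⟨h1, h2, by omega⟩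
      · rintro ⟨-, -, h⟩; omega
    · rw [if_neg h2]
      constructor
      · intro h; omega
      · rintro ⟨-, h, -⟩; exact absurd h h2
  · rw [if_neg h1]
    constructor
    · intro h; omega
    · rintro ⟨h, -⟩; exact absurd h h1

theorem countRun_ge (split : List (List String)) (l : String) (n : Nat) :
    ∀ j, 3 ≤ pvCountRun split l n j ↔
      (j + 2 < n ∧ l ∈ split.getD j [] ∧ l ∈ split.getD (j + 1) [] ∧ l ∈ split.getD (j + 2) []) := by
  intro j
  rw [show (3:Nat) = 2+1 from rfl, countRun_succ_le,
      show (2:Nat) = 1+1 from rfl, countRun_succ_le,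
      show (1:Nat) = 0+1 from rfl, countRun_succ_le]
  constructor
  · rintro ⟨h1, h2, h3, h4, h5, h6, -⟩
    exact ⟨h5, h2, h4, h6⟩
  · rintro ⟨h1, h2, h3, h4⟩
    exact ⟨by omega, h2, by omega, h3, ⟨h1, h4, Nat.zero_le _⟩⟩

theorem mem_foldl_iff {α β : Type} (F : List α → β → List α) (P : β → α → Prop)
    (h : ∀ rep b x, x ∈ F rep b ↔ x ∈ rep ∨ P b x) :
    ∀ (bs : List β) (rep : List α) (x : α), x ∈ bs.foldl F rep ↔ x ∈ rep ∨ ∃ b ∈ bs, P b x := by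
  intro bs
  induction bs with
  | nil => intro rep x; simp
  | cons b bs ih =>
    intro rep x
    rw [List.foldl_cons, ih, h]
    simp only [List.mem_cons]
    constructor
    · rintro (( hx | hp) | ⟨b', hb', hp⟩)
      · exact Or.inl hx
      · exact Or.inr ⟨b, Or.inl rfl, hp⟩
      · exact Or.inr ⟨b', Or.inr hb', hp⟩
    · rintro (hx | ⟨b', (rfl | hb'), hp⟩)
      · exact Or.inl (Or.inl hx)
      · exact Or.inl (Or.inr hp)
      · exact Or.inr ⟨b', hb', hp⟩

def pvWin (split : List (List String)) (l : String) : Prop :=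
  ∃ i, i + 2 < split.length ∧ l ∈ split.getD i [] ∧ l ∈ split.getD (i + 1) [] ∧ l ∈ split.getD (i + 2) []

theorem mem_repA (split : List (List String)) (l : String) :
    l ∈ pvRepA split ↔ (PySem.Str.strip l ≠ "" ∧ pvWin split l) := by
  unfold pvRepA
  rw [mem_foldl_iff _ (fun i x => x ∈ split.getD i [] ∧ PySem.Str.strip x ≠ "" ∧ 3 ≤ pvCountRun split x split.length i)]
  · simp only [PySem.Set.empty, List.not_mem_nil, false_or, List.mem_range]
    constructor
    · rintro ⟨i, hi, hmem, hnb, hrun⟩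
      rw [countRun_ge] at hrun
      exact ⟨hnb, i, hrun.1, hrun.2⟩
    · rintro ⟨hnb, i, hlt, hm0, hm1, hm2⟩
      exact ⟨i, by omega, hm0, hnb, (countRun_ge split l split.length i).mpr ⟨hlt, hm0, hm1, hm2⟩⟩
  · intro rep i x
    rw [mem_foldl_iff _ (fun line x => x = line ∧ PySem.Str.strip line ≠ "" ∧ 3 ≤ pvCountRun split line split.length i)]
    · constructor
      · rintro (hx | ⟨line, hline, rfl, h⟩)
        · exact Or.inl hx
        · exact Or.inr ⟨hline, h⟩
      · rintro (hx | ⟨hmem, h⟩)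
        · exact Or.inl hx
        · exact Or.inr ⟨x, hmem, rfl, h⟩
    · intro rep' line x
      by_cases hb : PySem.Str.strip line = ""
      · simp [hb]
      · rw [if_neg hb]
        by_cases hc : PySem.Set.contains rep' line = true
        · rw [if_pos hc]
          have hcm : line ∈ rep' := (PySem.Set.contains_iff rep' line).mp hc
          constructor
          · exact Or.inl
          · rintro (hx | ⟨rfl, -⟩)
            · exact hx
            · exact hcm
        · rw [if_neg hc]
          by_cases hr : 3 ≤ pvCountRun split line split.length i
          · rw [if_pos hr]
            simp [PySem.Set.mem_add, hb, hr]
          · rw [if_neg hr]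
            simp [hb, hr]
theorem stepB_inner (d : PySem.Dict String Int) (l : String) :
    ∀ (p : List String) (r0 : PySem.Set String) (n0 : PySem.Dict String Int),
      ((p.foldl (fun st2 line =>
          if PySem.Str.strip line = "" then st2
          else
            let v := d.getD line 0 + 1
            let ns := st2.2.insert line v
            if 3 ≤ v then (PySem.Set.add st2.1 line, ns) else (st2.1, ns)) (r0, n0)).2.getD l 0
        = (if l ∈ p ∧ PySem.Str.strip l ≠ "" then d.getD l 0 + 1 else n0.getD l 0))
      ∧ ((l ∈ (p.foldl (fun st2 line =>
          if PySem.Str.strip line = "" then st2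
          else
            let v := d.getD line 0 + 1
            let ns := st2.2.insert line v
            if 3 ≤ v then (PySem.Set.add st2.1 line, ns) else (st2.1, ns)) (r0, n0)).1)
        ↔ (l ∈ r0 ∨ (l ∈ p ∧ PySem.Str.strip l ≠ "" ∧ 3 ≤ d.getD l 0 + 1))) := by
  intro p
  induction p with
  | nil => intro r0 n0; simp
  | cons a p ih =>
    intro r0 n0
    rw [List.foldl_cons]
    by_cases hb : PySem.Str.strip a = ""
    · rw [if_pos hb]
      rcases ih r0 n0 with ⟨h1, h2⟩
      constructor
      · rw [h1]
        by_cases hl : l = a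
        · subst hl; simp [hb]
        · simp [List.mem_cons, hl]
      · rw [h2]
        by_cases hl : l = a
        · subst hl; simp [hb]
        · simp [List.mem_cons, hl]
    · rw [if_neg hb]
      simp only []
      by_cases hv : (3 : Int) ≤ d.getD a 0 + 1
      · rw [if_pos hv]
        rcases ih (PySem.Set.add r0 a) (n0.insert a (d.getD a 0 + 1)) with ⟨h1, h2⟩
        constructor
        · rw [h1]
          by_cases hl : l = a
          · subst hl
            simp [hb]
          · simp [List.mem_cons, hl, PySem.Dict.getD_insert]
        · rw [h2]
          by_cases hl : l = a
          · subst hl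
            simp [hb, hv, PySem.Set.mem_add]
          · simp [List.mem_cons, hl, PySem.Set.mem_add]
      · rw [if_neg hv]
        rcases ih r0 (n0.insert a (d.getD a 0 + 1)) with ⟨h1, h2⟩
        constructor
        · rw [h1]
          by_cases hl : l = a
          · subst hl
            simp [hb]
          · simp [List.mem_cons, hl, PySem.Dict.getD_insert]
        · rw [h2]
          by_cases hl : l = a
          · subst hl
            simp [hb, hv]
          · simp [List.mem_cons, hl]
def pvQ (l : String) (m : Nat) : List (List String) → Prop
  | [] => False
  | p :: ps => (l ∈ p ∧ 2 ≤ m) ∨ pvQ l (if l ∈ p then m + 1 else 0) ps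
theorem pvWin_cons (p : List String) (ps : List (List String)) (l : String) :
    pvWin (p :: ps) l ↔
      ((1 < ps.length ∧ l ∈ p ∧ l ∈ ps.getD 0 [] ∧ l ∈ ps.getD 1 []) ∨ pvWin ps l) := by
  unfold pvWin
  constructor
  · rintro ⟨i, hlen, h0, h1, h2⟩
    cases i with
    | zero => exact Or.inl ⟨by simpa using hlen, by simpa using h0, by simpa using h1, by simpa using h2⟩
    | succ j =>
      exact Or.inr ⟨j, by simpa using hlen, by simpa using h0, by simpa using h1, by simpa using h2⟩
  · rintro (⟨hlen, h0, h1, h2⟩ | ⟨j, hlen, h0, h1, h2⟩)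
    · exact ⟨0, by simpa using hlen, by simpa using h0, by simpa using h1, by simpa using h2⟩
    · exact ⟨j + 1, by simpa using hlen, by simpa using h0, by simpa using h1, by simpa using h2⟩
theorem pvQ_iff (l : String) : ∀ (ps : List (List String)) (m : Nat),
    pvQ l m ps ↔ (pvWin ps l
      ∨ (2 ≤ m ∧ 0 < ps.length ∧ l ∈ ps.getD 0 [])
      ∨ (1 ≤ m ∧ 1 < ps.length ∧ l ∈ ps.getD 0 [] ∧ l ∈ ps.getD 1 [])) := by
  intro ps
  induction ps with
  | nil => intro m; simp [pvQ, pvWin]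
  | cons p ps ih =>
    intro m
    rw [show pvQ l m (p :: ps) = ((l ∈ p ∧ 2 ≤ m) ∨ pvQ l (if l ∈ p then m + 1 else 0) ps) from rfl,
        ih, pvWin_cons]
    by_cases hp : l ∈ p
    · rw [if_pos hp]
      simp only [List.getD_cons_zero, List.getD_cons_succ, List.length_cons, hp, true_and,
        show ((2:Nat) ≤ m + 1) ↔ 1 ≤ m from by omega,
        show ((1:Nat) ≤ m + 1) ↔ True from by simp,
        show (0 < ps.length + 1) ↔ True from by simp,
        show (1 < ps.length + 1) ↔ 0 < ps.length from by omega]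
      tauto
    · rw [if_neg hp]
      simp only [List.getD_cons_zero, List.getD_cons_succ, List.length_cons, hp, false_and,
        false_or, and_false,
        show ((2:Nat) ≤ 0) ↔ False from by simp,
        show ((1:Nat) ≤ 0) ↔ False from by simp]

theorem foldB_mem (l : String) :
    ∀ (ps : List (List String)) (rep : PySem.Set String) (d : PySem.Dict String Int) (m : Nat),
      (PySem.Str.strip l ≠ "" → d.getD l 0 = (m : Int)) →
      (l ∈ (ps.foldl pvStepB (rep, d)).1 ↔ (l ∈ rep ∨ (PySem.Str.strip l ≠ "" ∧ pvQ l m ps))) := by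
  intro ps
  induction ps with
  | nil => intro rep d m _; simp [pvQ]
  | cons p ps ih =>
    intro rep d m hd
    rw [List.foldl_cons]
    have hstep : pvStepB (rep, d) p =
        (p.foldl (fun st2 line =>
          if PySem.Str.strip line = "" then st2
          else
            let v := d.getD line 0 + 1
            let ns := st2.2.insert line v
            if 3 ≤ v then (PySem.Set.add st2.1 line, ns) else (st2.1, ns)) (rep, PySem.Dict.empty)) := rfl
    rcases stepB_inner d l p rep PySem.Dict.empty with ⟨h1, h2⟩
    have hih := ih (pvStepB (rep, d) p).1 (pvStepB (rep, d) p).2 (if l ∈ p then m + 1 else 0) ?_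
    · rw [hih]
      rw [show (pvStepB (rep, d) p).1 = _ from congrArg Prod.fst hstep, h2]
      rw [show pvQ l m (p :: ps) = ((l ∈ p ∧ 2 ≤ m) ∨ pvQ l (if l ∈ p then m + 1 else 0) ps) from rfl]
      by_cases hb : PySem.Str.strip l = ""
      · simp [hb]
      · have hm : d.getD l 0 = (m : Int) := hd hb
        simp only [hb, ne_eq, not_false_iff, true_and, hm]
        constructor
        · rintro ((hr | ⟨hp, hv⟩) | hq)
          · exact Or.inl hr
          · exact Or.inr (Or.inl ⟨hp, by omega⟩)
          · exact Or.inr (Or.inr hq)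
        · rintro (hr | ⟨hp, h2'⟩ | hq)
          · exact Or.inl (Or.inl hr)
          · exact Or.inl (Or.inr ⟨hp, by omega⟩)
          · exact Or.inr hq
    · intro hb
      rw [show (pvStepB (rep, d) p).2 = _ from congrArg Prod.snd hstep, h1]
      simp only [hb, ne_eq, not_false_iff, and_true]
      by_cases hp : l ∈ p
      · simp [hp, hd hb]
      · simp [hp, PySem.Dict.getD_empty]

theorem mem_repB (split : List (List String)) (l : String) :
    l ∈ (split.foldl pvStepB (PySem.Set.empty, PySem.Dict.empty)).1 ↔
      (PySem.Str.strip l ≠ "" ∧ pvWin split l) := by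
  rw [foldB_mem l split PySem.Set.empty PySem.Dict.empty 0 (fun _ => by simp [PySem.Dict.getD_empty]),
      pvQ_iff]
  simp [PySem.Set.empty]

-- ===== VERDICT (by name: the statement is the Claim_ definition above) =====
theorem remove_repeated_headers_spec : Claim_equal_remove_repeated_headers := by
  intro pages _
  unfold Spec_remove_repeated_headers remove_repeated_headers remove_repeated_headers_alt
  by_cases hp : pages = []
  · rw [if_pos hp, if_pos hp]
  · rw [if_neg hp, if_neg hp]
    set split := pages.map (fun page => PySem.Str.splitlines page) with hs
    have hmem : ∀ x, (x ∈ pvRepA split ↔ x ∈ (split.foldl pvStepB (PySem.Set.empty, PySem.Dict.empty)).1) :=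
      fun x => by rw [mem_repA, mem_repB]
    have hnil : (pvRepA split = []) ↔ ((split.foldl pvStepB (PySem.Set.empty, PySem.Dict.empty)).1 = []) := by
      simp only [List.eq_nil_iff_forall_not_mem]
      exact forall_congr' fun x => not_congr (hmem x)
    by_cases h0 : pvRepA split = []
    · rw [if_pos h0, if_pos (hnil.mp h0)]
    · rw [if_neg h0, if_neg (fun h => h0 (hnil.mpr h))]
      apply List.map_congr_left
      intro lines _
      congr 1
      apply List.filter_congr
      intro x _
      have hc : PySem.Set.contains (pvRepA split) x
          = PySem.Set.contains ((split.foldl pvStepB (PySem.Set.empty, PySem.Dict.empty)).1) x := by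
        apply Bool.eq_iff_iff.mpr
        rw [PySem.Set.contains_iff, PySem.Set.contains_iff]
        exact hmem x
      rw [hc]
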